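-- pv_equiv track=rewrite | github.com/KevinSanchez-lpsr/class-samples | cipherTools.py | getReorderedLowercaseAlphabet
-- ===== SOURCE A (Python) =====
-- import string
--
-- def getReorderedLowercaseAlphabet(key):
--     alpha = string.ascii_lowercase
--     list = []
--     count = 26
--     while count > 0:
--     	list.append(alpha[(key + count) % 26])
--     	count = count - 1
--     return list
-- ===== SOURCE B (Python) =====
-- import string
--
-- def getReorderedLowercaseAlphabet(key):
--     a = string.ascii_lowercase
--     s = key % 26
--     return list(a[s::-1] + a[:s:-1])
-- ===== Notes on version B (the rewrite author's own statement) =====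
-- stated objective: simpler
-- what changed: Replaces the 26-iteration modular-index while loop with a direct construction: s = key % 26, then two reversed slices of the alphabet (a[s::-1] + a[:s:-1]) produce the same rotated-backwards alphabet with no loop.
import Mathlib
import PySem

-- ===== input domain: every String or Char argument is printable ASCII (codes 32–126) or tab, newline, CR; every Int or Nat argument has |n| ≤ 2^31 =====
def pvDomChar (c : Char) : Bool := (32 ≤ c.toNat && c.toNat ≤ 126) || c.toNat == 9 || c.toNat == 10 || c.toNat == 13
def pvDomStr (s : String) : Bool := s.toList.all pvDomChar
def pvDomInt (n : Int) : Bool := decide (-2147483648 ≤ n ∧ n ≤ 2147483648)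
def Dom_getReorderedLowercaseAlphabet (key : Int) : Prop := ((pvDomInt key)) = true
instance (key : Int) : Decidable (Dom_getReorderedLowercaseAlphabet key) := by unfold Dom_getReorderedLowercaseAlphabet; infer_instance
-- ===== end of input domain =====

-- B replaces A's 26-step modular-index while loop by two reversed slices of the
-- alphabet at s = key % 26 (objective: simpler — no loop at all).

-- ===== PORT A =====
def pvAlpha : String := "abcdefghijklmnopqrstuvwxyz"

-- the while loop of A: `count` is the loop counter (26 down to 1), `acc` the list built so far.
-- alpha[(key+count) % 26]: the index is 0 ≤ · < 26 (Python % with positive divisor), so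
-- pyGet? is always `some`; `.getD ' '` only discharges the Option.
def pvLoopA (key : Int) : Nat → List String → List String
  | 0, acc => acc
  | Nat.succ m, acc =>
      pvLoopA key m
        (acc ++ [String.ofList [(PySem.Str.pyGet? pvAlpha
            (PySem.Int.mod (key + ((Nat.succ m : Nat) : Int)) 26)).getD ' ']])

def getReorderedLowercaseAlphabet (key : Int) : List String :=
  pvLoopA key 26 []

-- ===== PORT B =====
-- list(a[s::-1] + a[:s:-1]) with s = key % 26; step -1 slices never raise, `.getD ""` only
-- discharges the Option.
def getReorderedLowercaseAlphabet_alt (key : Int) : List String :=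
  let s := PySem.Int.mod key 26
  let p1 := (PySem.Str.slice? pvAlpha (some s) none (-1)).getD ""
  let p2 := (PySem.Str.slice? pvAlpha none (some s) (-1)).getD ""
  (p1 ++ p2).toList.map (fun c => String.ofList [c])

-- ===== PRECONDITION & SPEC =====
def Spec_getReorderedLowercaseAlphabet (key : Int) (out : List String) : Prop := out = getReorderedLowercaseAlphabet_alt key
instance (key : Int) (out : List String) : Decidable (Spec_getReorderedLowercaseAlphabet key out) := by unfold Spec_getReorderedLowercaseAlphabet; infer_instance

-- ===== CLAIM (what is proved, stated in full; the proofs are below) =====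
def Claim_equal_getReorderedLowercaseAlphabet : Prop := ∀ (key : Int), Dom_getReorderedLowercaseAlphabet key → Spec_getReorderedLowercaseAlphabet key (getReorderedLowercaseAlphabet key)

-- ===== LEMMAS AND PROOFS =====

-- Python %: (key + c) % 26 = (key % 26 + c) % 26
lemma pv_mod_step (key c : Int) :
    PySem.Int.mod (key + c) 26 = PySem.Int.mod (PySem.Int.mod key 26 + c) 26 := by
  rw [PySem.Int.mod_eq_emod_of_pos (by norm_num), PySem.Int.mod_eq_emod_of_pos (by norm_num),
      PySem.Int.mod_eq_emod_of_pos (by norm_num)]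
  omega

-- A's loop depends on key only through key % 26
lemma pvLoopA_mod (key : Int) (n : Nat) (acc : List String) :
    pvLoopA key n acc = pvLoopA (PySem.Int.mod key 26) n acc := by
  induction n generalizing acc with
  | zero => rfl
  | succ m ih =>
      simp only [pvLoopA, pv_mod_step key ((Nat.succ m : Nat) : Int)]
      exact ih _

-- B depends on key only through key % 26
lemma pvAlt_mod (key : Int) :
    getReorderedLowercaseAlphabet_alt key
      = getReorderedLowercaseAlphabet_alt (PySem.Int.mod key 26) := by
  have h : PySem.Int.mod (PySem.Int.mod key 26) 26 = PySem.Int.mod key 26 := by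
    rw [PySem.Int.mod_eq_emod_of_pos (by norm_num), PySem.Int.mod_eq_emod_of_pos (by norm_num)]
    omega
  simp only [getReorderedLowercaseAlphabet_alt, h]

-- the 26 residues, checked by computation
set_option maxHeartbeats 2000000 in
lemma pv_case (r : Int) (h0 : 0 ≤ r) (h1 : r < 26) :
    getReorderedLowercaseAlphabet r = getReorderedLowercaseAlphabet_alt r := by
  interval_cases r <;> decide

-- ===== VERDICT (by name: the statement is the Claim_ definition above) =====
theorem getReorderedLowercaseAlphabet_spec : Claim_equal_getReorderedLowercaseAlphabet := by
  intro key _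
  unfold Spec_getReorderedLowercaseAlphabet
  have h0 : 0 ≤ PySem.Int.mod key 26 := PySem.Int.mod_nonneg _ (by norm_num)
  have h1 : PySem.Int.mod key 26 < 26 := PySem.Int.mod_lt _ (by norm_num)
  calc getReorderedLowercaseAlphabet key
      = getReorderedLowercaseAlphabet (PySem.Int.mod key 26) := pvLoopA_mod key 26 []
    _ = getReorderedLowercaseAlphabet_alt (PySem.Int.mod key 26) := pv_case _ h0 h1
    _ = getReorderedLowercaseAlphabet_alt key := (pvAlt_mod key).symm
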